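-- pv_equiv track=rewrite | github.com/uselessnaming/Programmers | rough_keyboard.py | solution
-- ===== SOURCE A (Python) =====
-- def solution(keymap, targets):
--     answer = []
--     alpha = {}
--
--     # dictionary에 최소 값 주입
--     for i in range(len(keymap)):
--         for j in range(len(keymap[i])):
--             if keymap[i][j] not in alpha:
--                 alpha[keymap[i][j]] = j+1
--             else:
--                 if j < alpha[keymap[i][j]]:
--                     alpha[keymap[i][j]] = j+1
--
--     # target 마다 매겨진 점수를 answer에 추가
--     for target in targets:
--         score = 0
--         for t in target:
--             if t in alpha:
--                 score += alpha[t]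
--             else:
--                 score = -1
--                 break
--         answer.append(score)
--     return answer
-- ===== SOURCE B (Python) =====
-- def solution(keymap, targets):
--     # Dict-free rewrite: recompute each character's best (minimum index+1 over
--     # all occurrences in all keymap rows) on demand by scanning the keymap.
--     answer = []
--     for target in targets:
--         score = 0
--         for t in target:
--             best = -1
--             for row in keymap:
--                 for j, ch in enumerate(row):
--                     if ch == t and (best == -1 or j + 1 < best):
--                         best = j + 1
--             if best == -1:
--                 score = -1
--                 break
--             score += best
--         answer.append(score)
--     return answer
-- ===== Notes on version B (the rewrite author's own statement) =====
-- stated objective: alternative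
-- what changed: Eliminates A's precomputed min-index dictionary: B rescans the whole keymap per target character, keeping a running best (min index+1) with a -1 sentinel, trading A's one-pass table build for a dict-free on-demand scan.
import Mathlib
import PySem

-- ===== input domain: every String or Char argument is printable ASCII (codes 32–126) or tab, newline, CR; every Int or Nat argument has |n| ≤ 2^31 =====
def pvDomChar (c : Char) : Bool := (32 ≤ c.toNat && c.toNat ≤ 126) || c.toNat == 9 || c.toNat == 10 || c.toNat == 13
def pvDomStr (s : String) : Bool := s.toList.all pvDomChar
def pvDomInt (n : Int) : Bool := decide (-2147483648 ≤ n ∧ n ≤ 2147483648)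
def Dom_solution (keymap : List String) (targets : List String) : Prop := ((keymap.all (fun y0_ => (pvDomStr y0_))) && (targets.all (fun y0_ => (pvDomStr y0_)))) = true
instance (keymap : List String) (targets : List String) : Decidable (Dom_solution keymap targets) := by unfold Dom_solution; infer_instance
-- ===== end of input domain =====

-- B eliminates A's precomputed min-index dictionary and instead rescans the whole
-- keymap for each target character (objective: alternative, dict-free decomposition).

-- ===== PORT A =====
-- one char step of A's dict-building loop: if c not in alpha: alpha[c]=j+1 elif j<alpha[c]: alpha[c]=j+1
def alphaStep (d : PySem.Dict Char Int) (jc : Int × Char) : PySem.Dict Char Int :=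
  match d.get? jc.2 with
  | none => d.insert jc.2 (jc.1 + 1)
  | some v => if jc.1 < v then d.insert jc.2 (jc.1 + 1) else d

-- the two nested index loops of A (indexing keymap[i][j] = folding the enumerated rows/chars)
def buildAlpha (keymap : List String) : PySem.Dict Char Int :=
  keymap.foldl (fun d row => (PySem.List.enumerate row.toList 0).foldl alphaStep d) PySem.Dict.empty

-- A's per-target loop with the break (-1 on the first char not in alpha)
def scoreA (alpha : PySem.Dict Char Int) : List Char → Int → Int
  | [], score => score
  | t :: ts, score =>
    match alpha.get? t with
    | some v => scoreA alpha ts (score + v)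
    | none => -1

def solution (keymap : List String) (targets : List String) : List Int :=
  let alpha := buildAlpha keymap
  targets.foldl (fun answer target => answer ++ [scoreA alpha target.toList 0]) []

-- ===== PORT B =====
-- B's innermost update: if ch == t and (best == -1 or j+1 < best): best = j+1
def bestStep (t : Char) (best : Int) (jc : Int × Char) : Int :=
  if jc.2 = t ∧ (best = -1 ∨ jc.1 + 1 < best) then jc.1 + 1 else best

-- scan every row of keymap for t, keeping the running minimum index+1 (-1 = not found)
def bestChar (keymap : List String) (t : Char) : Int :=
  keymap.foldl (fun best row => (PySem.List.enumerate row.toList 0).foldl (bestStep t) best) (-1)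

def scoreB (keymap : List String) : List Char → Int → Int
  | [], score => score
  | t :: ts, score =>
    let best := bestChar keymap t
    if best = -1 then -1 else scoreB keymap ts (score + best)

def solution_alt (keymap : List String) (targets : List String) : List Int :=
  targets.foldl (fun answer target => answer ++ [scoreB keymap target.toList 0]) []

-- ===== PRECONDITION & SPEC =====
def Spec_solution (keymap : List String) (targets : List String) (out : List Int) : Prop := out = solution_alt keymap targets
instance (keymap : List String) (targets : List String) (out : List Int) : Decidable (Spec_solution keymap targets out) := by unfold Spec_solution; infer_instance

-- ===== CLAIM (what is proved, stated in full; the proofs are below) =====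
def Claim_equal_solution : Prop := ∀ (keymap : List String) (targets : List String), Dom_solution keymap targets → Spec_solution keymap targets (solution keymap targets)

-- ===== LEMMAS AND PROOFS =====

-- encode B's -1 sentinel as A's dict-lookup result
def enc (b : Int) : Option Int := if b = -1 then none else some b

theorem step_rel (d : PySem.Dict Char Int) (f : Char → Int)
    (hf : ∀ c, d.get? c = enc (f c)) (p : Int × Char) (hp : 0 ≤ p.1) (c : Char) :
    (alphaStep d p).get? c = enc (bestStep c (f c) p) := by
  obtain ⟨j, ch⟩ := p
  simp only at hp
  by_cases hc : ch = c
  · subst hc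
    have h := hf ch
    cases hd : d.get? ch with
    | none =>
      have hfc : f ch = -1 := by
        by_contra hne
        rw [hd] at h; simp [enc, hne] at h
      have hA : alphaStep d (j, ch) = d.insert ch (j + 1) := by simp [alphaStep, hd]
      have hB : bestStep ch (f ch) (j, ch) = j + 1 := by simp [bestStep, hfc]
      rw [hA, hB, PySem.Dict.get?_insert_self]
      have : j + 1 ≠ -1 := by omega
      simp [enc, this]
    | some v =>
      rw [hd] at h
      have hveq : f ch = v := by
        by_cases hne : f ch = -1
        · simp [enc, hne] at h
        · simpa [enc, hne] using h.symm
      have hvne : v ≠ -1 := fun hv => by simp [enc, hveq, hv] at h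
      by_cases hlt : j + 1 < v
      · have hA : alphaStep d (j, ch) = d.insert ch (j + 1) := by
          simp [alphaStep, hd]; omega
        have hB : bestStep ch (f ch) (j, ch) = j + 1 := by
          simp [bestStep, hveq]; omega
        rw [hA, hB, PySem.Dict.get?_insert_self]
        have : j + 1 ≠ -1 := by omega
        simp [enc, this]
      · have hB : bestStep ch (f ch) (j, ch) = v := by
          simp [bestStep, hveq, hvne, hlt]
        rw [hB]
        by_cases hlt' : j < v
        · have hjv : j + 1 = v := by omega
          have hA : alphaStep d (j, ch) = d.insert ch (j + 1) := by
            simp [alphaStep, hd, hlt']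
          rw [hA, PySem.Dict.get?_insert_self, hjv]
          simp [enc, hvne]
        · have hA : alphaStep d (j, ch) = d := by simp [alphaStep, hd, hlt']
          rw [hA, hd]
          simp [enc, hvne]
  · have hB : bestStep c (f c) (j, ch) = f c := by simp [bestStep, hc]
    rw [hB, ← hf c]
    have hne : c ≠ ch := fun h => hc h.symm
    unfold alphaStep
    cases hd : d.get? (j, ch).2 with
    | none => exact PySem.Dict.get?_insert_of_ne d (j + 1) hne
    | some v =>
      show (if j < v then d.insert ch (j + 1) else d).get? c = d.get? c
      split_ifs
      · exact PySem.Dict.get?_insert_of_ne d (j + 1) hne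
      · rfl

theorem inner_rel (ps : List (Int × Char)) (hps : ∀ p ∈ ps, 0 ≤ p.1)
    (d : PySem.Dict Char Int) (f : Char → Int)
    (hf : ∀ c, d.get? c = enc (f c)) (c : Char) :
    (ps.foldl alphaStep d).get? c = enc (ps.foldl (fun b p => bestStep c b p) (f c)) := by
  induction ps generalizing d f with
  | nil => exact hf c
  | cons p rest ih =>
    simp only [List.foldl_cons]
    exact ih (fun q hq => hps q (List.mem_cons_of_mem _ hq)) (alphaStep d p)
      (fun c' => bestStep c' (f c') p)
      (fun c' => step_rel d f hf p (hps p (List.mem_cons_self ..)) c')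

theorem enum_nonneg (xs : List Char) : ∀ p ∈ PySem.List.enumerate xs 0, (0:Int) ≤ p.1 := by
  intro p hp
  rw [PySem.List.mem_enumerate_iff] at hp
  obtain ⟨k, hk, rfl⟩ := hp
  simp

theorem outer_rel (km : List String) (d : PySem.Dict Char Int) (f : Char → Int)
    (hf : ∀ c, d.get? c = enc (f c)) (c : Char) :
    (km.foldl (fun d row => (PySem.List.enumerate row.toList 0).foldl alphaStep d) d).get? c
      = enc (km.foldl (fun b row => (PySem.List.enumerate row.toList 0).foldl (fun b p => bestStep c b p) b) (f c)) := by
  induction km generalizing d f with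
  | nil => exact hf c
  | cons row rest ih =>
    simp only [List.foldl_cons]
    exact ih ((PySem.List.enumerate row.toList 0).foldl alphaStep d)
      (fun c' => (PySem.List.enumerate row.toList 0).foldl (fun b p => bestStep c' b p) (f c'))
      (fun c' => inner_rel _ (enum_nonneg row.toList) d f hf c')

theorem alpha_get (km : List String) (c : Char) :
    (buildAlpha km).get? c = enc (bestChar km c) := by
  have := outer_rel km PySem.Dict.empty (fun _ => -1)
    (fun c => by simp [PySem.Dict.get?_empty, enc]) c
  simpa [buildAlpha, bestChar, bestStep] using this

theorem score_rel (km : List String) (ts : List Char) (s : Int) :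
    scoreA (buildAlpha km) ts s = scoreB km ts s := by
  induction ts generalizing s with
  | nil => rfl
  | cons t ts ih =>
    simp only [scoreA, scoreB, alpha_get km t]
    by_cases hb : bestChar km t = -1
    · simp [enc, hb]
    · simp [enc, hb, ih]

-- ===== VERDICT (by name: the statement is the Claim_ definition above) =====
theorem solution_spec : Claim_equal_solution := by
  intro keymap targets _
  unfold Spec_solution solution solution_alt
  simp only [score_rel]
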